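-- pv_equiv track=rewrite | github.com/lara-queirogaa/elementos | elementos de ia/uteis/check_win.py | check_win
-- ===== SOURCE A (Python) =====
-- def check_win(board, level):
--     win = False
--     if level == 1:
--         prateleiras = 0
--         for i in range(0,6):
--             bolas = 1
--             if sum(board[i]) == 0:
--                 continue
--             else:
--                 for j in range(1,4):
--                     if board[i][j] == board [i][j-1]:
--                         bolas += 1
--                 if bolas == 4:
--                     prateleiras += 1
--         if prateleiras == 4:
--             win = True
--
--     elif level == 2:
--         prateleiras = 0
--         for i in range(0,7):
--             bolas = 1
--             if sum(board[i]) == 0: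
--                 continue
--             else:
--                 for j in range(1,4):
--                     if board[i][j] == board [i][j-1]:
--                         bolas += 1
--                 if bolas == 4:
--                     prateleiras += 1
--         if prateleiras == 5:
--             win = True
--
--     elif level == 3:
--         prateleiras = 0
--         for i in range(0,8):
--             bolas = 1
--             if sum(board[i]) == 0:
--                 continue
--             else:
--                 for j in range(1,4):
--                     if board[i][j] == board [i][j-1]:
--                         bolas += 1
--                 if bolas == 4:
--                     prateleiras += 1
--         if prateleiras == 6:
--             win = True
--
--     return win
-- ===== SOURCE B (Python) =====
-- def check_win(board, level):
--     # Recursive countdown: walk the first level+5 rows once, decrementing the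
--     # number of still-needed matched shelves (level+3 = rows-2), failing early
--     # on overshoot; a shelf matches iff its sum is nonzero and its first four
--     # balls form a one-element set.
--     if not (1 <= level <= 3):
--         return False
--     n = level + 5
--
--     def go(rows, need):
--         if not rows:
--             return need == 0
--         row, rest = rows[0], rows[1:]
--         if sum(row) != 0 and len(set(row[:4])) == 1:
--             if need == 0:
--                 return False
--             return go(rest, need - 1)
--         return go(rest, need)
--
--     return go(board[:n], n - 2)
-- ===== Notes on version B (the rewrite author's own statement) =====
-- stated objective: alternative
-- what changed: Replaces A's three copied count-then-compare branches with a single recursion over the first level+5 rows that counts DOWN the still-needed matched shelves (computed as level+3 from the level arithmetically, no table or branch copies) with early failure on overshoot, and replaces the consecutive-pair 'bolas' counter with a one-element-set test on the first four balls.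
import Mathlib
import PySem

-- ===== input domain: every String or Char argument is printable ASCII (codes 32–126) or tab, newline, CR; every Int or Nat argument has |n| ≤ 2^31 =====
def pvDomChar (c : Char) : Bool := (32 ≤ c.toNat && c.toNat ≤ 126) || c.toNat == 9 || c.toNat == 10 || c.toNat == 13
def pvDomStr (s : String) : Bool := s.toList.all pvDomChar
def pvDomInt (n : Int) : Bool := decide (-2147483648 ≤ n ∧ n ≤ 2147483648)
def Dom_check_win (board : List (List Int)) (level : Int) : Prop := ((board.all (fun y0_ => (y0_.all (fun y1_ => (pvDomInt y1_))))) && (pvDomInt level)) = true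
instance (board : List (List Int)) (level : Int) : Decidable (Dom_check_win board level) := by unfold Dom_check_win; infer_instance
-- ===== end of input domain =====

-- B replaces A's three copied counting branches by a single recursive countdown over
-- the first level+5 rows, decrementing the number of still-needed matched shelves
-- and failing early on overshoot (objective: alternative decomposition).

-- ===== PORT A =====
-- A's per-level loop body is identical in the three branches; this helper is that loop,
-- parameterised by the row count, called once per branch exactly as A's code repeats it.
def pratA (board : List (List Int)) (n : Nat) : Int :=
  (List.range n).foldl (fun prateleiras i =>
    let row := (PySem.List.pyGet? board (Int.ofNat i)).getD []
    if row.sum = 0 then prateleiras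
    else
      let bolas := (PySem.List.pyRange 1 4 1).foldl (fun bolas j =>
        if (PySem.List.pyGet? row j).getD 0 = (PySem.List.pyGet? row (j - 1)).getD 0
        then bolas + 1 else bolas) (1 : Int)
      if bolas = 4 then prateleiras + 1 else prateleiras) 0

def check_win (board : List (List Int)) (level : Int) : Bool :=
  let win := false
  if level = 1 then (if pratA board 6 = 4 then true else win)
  else if level = 2 then (if pratA board 7 = 5 then true else win)
  else if level = 3 then (if pratA board 8 = 6 then true else win)
  else win

-- ===== PORT B =====
-- Source B's inner recursive helper `go`: countdown of still-needed matched shelves.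
def goB (rows : List (List Int)) (need : Int) : Bool :=
  match rows with
  | [] => need == 0
  | row :: rest =>
    if row.sum ≠ 0 ∧ (PySem.Set.ofList (PySem.List.slice row (some 0) (some 4))).length = 1 then
      if need = 0 then false else goB rest (need - 1)
    else goB rest need

def check_win_alt (board : List (List Int)) (level : Int) : Bool :=
  if ¬ (1 ≤ level ∧ level ≤ 3) then false
  else
    let n : Int := level + 5
    goB (PySem.List.slice board (some 0) (some n)) (n - 2)

-- ===== PRECONDITION & SPEC =====
-- Pre_ excludes exactly the inputs on which Python A raises IndexError: for a known level,
-- the board must have that many rows and every counted row (first n rows, sum ≠ 0) length ≥ 4.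
def rowsOK (board : List (List Int)) (n : Nat) : Bool :=
  decide (n ≤ board.length) &&
    (board.take n).all (fun row => row.sum == 0 || decide (4 ≤ row.length))

def Pre_check_win (board : List (List Int)) (level : Int) : Prop :=
  (level = 1 → rowsOK board 6 = true) ∧ (level = 2 → rowsOK board 7 = true) ∧
  (level = 3 → rowsOK board 8 = true)
instance (board : List (List Int)) (level : Int) : Decidable (Pre_check_win board level) := by
  unfold Pre_check_win; infer_instance

def pvWitness_check_win : List (List Int) × Int :=
  ([[1, 1, 1, 1], [1, 1, 1, 1], [2, 2, 2, 2], [3, 3, 3, 3], [0, 0, 0, 0], [0, 0, 0, 0]], 1)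

def Spec_check_win (board : List (List Int)) (level : Int) (out : Bool) : Prop := out = check_win_alt board level
instance (board : List (List Int)) (level : Int) (out : Bool) : Decidable (Spec_check_win board level out) := by unfold Spec_check_win; infer_instance

-- ===== CLAIM (what is proved, stated in full; the proofs are below) =====
def Claim_equal_check_win : Prop := ∀ (board : List (List Int)) (level : Int), Dom_check_win board level → Pre_check_win board level → Spec_check_win board level (check_win board level)

-- ===== LEMMAS AND PROOFS =====

-- A's row test, as a predicate on the row itself.
def predA (row : List Int) : Bool :=
  decide (row.sum ≠ 0) &&
    decide ((PySem.List.pyRange 1 4 1).foldl (fun bolas j =>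
      if (PySem.List.pyGet? row j).getD 0 = (PySem.List.pyGet? row (j - 1)).getD 0
      then bolas + 1 else bolas) (1 : Int) = 4)

-- B's row test, as a predicate on the row itself.
def predB (row : List Int) : Bool :=
  decide (row.sum ≠ 0) &&
    decide ((PySem.Set.ofList (PySem.List.slice row (some 0) (some 4))).length = 1)

theorem take_eq_map_range (board : List (List Int)) (n : Nat) (h : n ≤ board.length) :
    board.take n = (List.range n).map (fun i => (PySem.List.pyGet? board (Int.ofNat i)).getD []) := by
  apply List.ext_getElem
  · simp [Nat.min_eq_left h]
  · intro i h1 h2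
    simp only [List.getElem_take, List.getElem_map, List.getElem_range]
    have hi : i < board.length := by simp [Nat.min_eq_left h] at h1; omega
    simp [PySem.List.pyGet?, PySem.List.pyIdx?, Int.ofNat_eq_natCast, hi]

theorem pratA_eq_countP (board : List (List Int)) (n : Nat) (h : n ≤ board.length) :
    pratA board n = ((board.take n).countP predA : Int) := by
  have hstep : pratA board n
      = (List.range n).foldl (fun prat i =>
          if predA ((PySem.List.pyGet? board (Int.ofNat i)).getD []) then prat + 1 else prat) 0 := by
    unfold pratA
    congr 1
    funext prat i
    simp only [predA]
    split_ifs <;> simp_all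
  rw [hstep, PySem.List.foldl_count_if, take_eq_map_range board n h, List.countP_map]
  simp only [Function.comp_def, zero_add]

theorem predB_true_iff (row : List Int) :
    predB row = true ↔
      (row.sum ≠ 0 ∧ (PySem.Set.ofList (PySem.List.slice row (some 0) (some 4))).length = 1) := by
  simp only [predB, Bool.and_eq_true, decide_eq_true_eq]

theorem beq_shift (c : Nat) (need : Int) : ((c : Int) == need - 1) = (((c : Int) + 1) == need) := by
  rcases eq_or_ne ((c : Int)) (need - 1) with he | he
  · rw [beq_iff_eq.mpr he, beq_iff_eq.mpr (by omega : (c : Int) + 1 = need)]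
  · rw [beq_eq_false_iff_ne.mpr he, beq_eq_false_iff_ne.mpr (by omega : (c : Int) + 1 ≠ need)]

theorem goB_eq_countP (rows : List (List Int)) (need : Int) :
    goB rows need = ((rows.countP predB : Int) == need) := by
  induction rows generalizing need with
  | nil =>
    simp only [goB, List.countP_nil, Nat.cast_zero]
    rcases eq_or_ne need 0 with h | h
    · rw [h]
    · rw [beq_eq_false_iff_ne.mpr h, beq_eq_false_iff_ne.mpr (Ne.symm h)]
  | cons row rest ih =>
    simp only [goB]
    by_cases hc : row.sum ≠ 0 ∧ (PySem.Set.ofList (PySem.List.slice row (some 0) (some 4))).length = 1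
    · rw [if_pos hc]
      have hcount : ((row :: rest).countP predB : Int) = (rest.countP predB : Int) + 1 := by
        rw [List.countP_cons, (predB_true_iff row).mpr hc]
        push_cast
        norm_num
      by_cases hz : need = 0
      · rw [if_pos hz, hz, hcount, beq_eq_false_iff_ne.mpr (by omega)]
      · rw [if_neg hz, ih, hcount, beq_shift]
    · rw [if_neg hc]
      have hp : predB row = false := by
        rw [Bool.eq_false_iff]
        intro h
        exact hc ((predB_true_iff row).mp h)
      rw [List.countP_cons, hp]
      simpa using ih need

theorem set4_len_one (a b c d : Int) :
    ((PySem.Set.ofList [a, b, c, d]).length = 1) ↔ (a = b ∧ b = c ∧ c = d) := by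
  simp only [PySem.Set.ofList, List.foldl, PySem.Set.add, PySem.Set.empty]
  split_ifs <;> simp_all <;> omega

-- On every row A can finish on (sum 0 or length ≥ 4), the two row tests agree.
theorem predA_eq_predB (row : List Int) (h : row.sum = 0 ∨ 4 ≤ row.length) :
    predA row = predB row := by
  by_cases hz : row.sum = 0
  · simp [predA, predB, hz]
  · have hlen : 4 ≤ row.length := h.resolve_left hz
    match row, hlen with
    | a :: b :: c :: d :: t, _ =>
      have hL : ∀ k : Int, 0 ≤ k → k < ((a :: b :: c :: d :: t).length : Int) →
          (PySem.List.pyGet? (a :: b :: c :: d :: t) k).getD 0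
            = (a :: b :: c :: d :: t).getD k.toNat 0 := by
        intro k hk0 hkl
        simp only [PySem.List.pyGet?, PySem.List.pyIdx?]
        rw [if_pos hk0, if_pos hkl]
        simp [List.getD]
      have hlen5 : (4:Int) < ((a :: b :: c :: d :: t).length : Int) ∨ True := Or.inr trivial
      have g0 := hL 0 (by norm_num) (by simp; omega)
      have g1 := hL 1 (by norm_num) (by simp; omega)
      have g2 := hL 2 (by norm_num) (by simp; omega)
      have g3 := hL 3 (by norm_num) (by simp; omega)
      have hsl : PySem.List.slice (a :: b :: c :: d :: t) (some 0) (some 4) = [a, b, c, d] := by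
        rw [PySem.List.slice_toNat _ (by norm_num) (by norm_num)]; rfl
      have hr : PySem.List.pyRange 1 4 1 = [1, 2, 3] := by decide
      simp only [predA, predB, hr, List.foldl, hsl, set4_len_one]
      rw [show (1 : Int) - 1 = 0 by norm_num, show (2 : Int) - 1 = 1 by norm_num,
          show (3 : Int) - 1 = 2 by norm_num, g0, g1, g2, g3]
      simp only [List.getD]
      congr 1
      rw [decide_eq_decide]
      split_ifs <;> simp_all <;> omega

theorem countP_take_eq (board : List (List Int)) (n : Nat) (hok : rowsOK board n = true) :
    (board.take n).countP predA = (board.take n).countP predB := by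
  apply List.countP_congr
  intro row hrow
  have hcond : row.sum = 0 ∨ 4 ≤ row.length := by
    simp only [rowsOK, Bool.and_eq_true, List.all_eq_true] at hok
    have := hok.2 row hrow
    rcases Bool.or_eq_true_iff.mp this with h | h
    · left; exact by simpa using h
    · right; exact by simpa using h
  rw [predA_eq_predB row hcond]

-- Per-level agreement: A's branch value equals B's recursion on the sliced board.
theorem level_case (board : List (List Int)) (n : Nat) (t : Int)
    (hok : rowsOK board n = true) :
    (if pratA board n = t then true else false)
      = goB (PySem.List.slice board (some 0) (some (n : Int))) t := by
  have hlen : n ≤ board.length := by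
    simp only [rowsOK, Bool.and_eq_true, decide_eq_true_eq] at hok; exact hok.1
  have hsl : PySem.List.slice board (some 0) (some (n : Int)) = board.take n := by
    rw [PySem.List.slice_toNat _ (by norm_num) (by positivity)]
    simp
  rw [hsl, goB_eq_countP, pratA_eq_countP board n hlen, countP_take_eq board n hok]
  rcases eq_or_ne (((board.take n).countP predB : Int)) t with h | h
  · rw [if_pos h, beq_iff_eq.mpr h]
  · rw [if_neg h, beq_eq_false_iff_ne.mpr h]

-- ===== VERDICT (by name: the statement is the Claim_ definition above) =====
theorem check_win_spec : Claim_equal_check_win := by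
  intro board level _ hpre
  unfold Spec_check_win check_win check_win_alt
  obtain ⟨p1, p2, p3⟩ := hpre
  by_cases h1 : level = 1
  · subst h1
    rw [if_neg (by omega : ¬ ¬ ((1:Int) ≤ 1 ∧ (1:Int) ≤ 3))]
    have := level_case board 6 4 (p1 rfl)
    norm_num at this ⊢
    exact this
  · by_cases h2 : level = 2
    · subst h2
      rw [if_neg h1, if_neg (by omega : ¬ ¬ ((1:Int) ≤ 2 ∧ (2:Int) ≤ 3))]
      have := level_case board 7 5 (p2 rfl)
      norm_num at this ⊢
      exact this
    · by_cases h3 : level = 3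
      · subst h3
        rw [if_neg h1, if_neg h2, if_neg (by omega : ¬ ¬ ((1:Int) ≤ 3 ∧ (3:Int) ≤ 3))]
        have := level_case board 8 6 (p3 rfl)
        norm_num at this ⊢
        exact this
      · rw [if_neg h1, if_neg h2, if_neg h3, if_pos (by omega : ¬ (1 ≤ level ∧ level ≤ 3))]
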